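-- pv_equiv track=rewrite | github.com/Aider-AI/aider | .venv/lib/python3.11/site-packages/litellm/integrations/slack_alerting.py | _count_outage_alerts
-- ===== SOURCE A (Python) =====
-- from typing import Any, Dict, List, Literal, Optional, Set, TypedDict, Union
--
-- def _count_outage_alerts(alerts: List[int]) -> str:
--     """
--     Parameters:
--     - alerts: List[int] -> list of error codes (either 408 or 500+)
--
--     Returns:
--     - str -> formatted string. This is an alert message, giving a human-friendly description of the errors.
--     """
--     error_breakdown = {"Timeout Errors": 0, "API Errors": 0, "Unknown Errors": 0}
--     for alert in alerts:
--         if alert == 408: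
--             error_breakdown["Timeout Errors"] += 1
--         elif alert >= 500:
--             error_breakdown["API Errors"] += 1
--         else:
--             error_breakdown["Unknown Errors"] += 1
--
--     error_msg = ""
--     for key, value in error_breakdown.items():
--         if value > 0:
--             error_msg += "\n{}: {}\n".format(key, value)
--
--     return error_msg
-- ===== SOURCE B (Python) =====
-- from typing import List
--
-- def _count_outage_alerts(alerts: List[int]) -> str:
--     timeout = sum(1 for a in alerts if a == 408)
--     api = sum(1 for a in alerts if a >= 500)
--     unknown = len(alerts) - timeout - api
--     parts = [("Timeout Errors", timeout), ("API Errors", api), ("Unknown Errors", unknown)]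
--     return "".join("\n{}: {}\n".format(k, v) for k, v in parts if v > 0)
-- ===== Notes on version B (the rewrite author's own statement) =====
-- stated objective: simpler
-- what changed: Replaces the per-element elif chain updating a running dict with independent count passes (timeout and api by direct counting, unknown as len minus the other two) and a join over fixed labeled parts.
import Mathlib
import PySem

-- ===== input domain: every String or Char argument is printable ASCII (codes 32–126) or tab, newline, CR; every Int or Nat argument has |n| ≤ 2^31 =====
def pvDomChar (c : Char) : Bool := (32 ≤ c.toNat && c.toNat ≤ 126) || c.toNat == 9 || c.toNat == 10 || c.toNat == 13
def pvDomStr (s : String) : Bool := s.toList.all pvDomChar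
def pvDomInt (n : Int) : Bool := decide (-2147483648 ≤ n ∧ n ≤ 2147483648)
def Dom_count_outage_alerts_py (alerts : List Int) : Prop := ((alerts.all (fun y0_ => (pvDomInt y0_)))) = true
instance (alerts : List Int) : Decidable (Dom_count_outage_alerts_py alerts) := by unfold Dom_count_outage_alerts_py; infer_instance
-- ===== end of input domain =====

-- ===== PORT A =====
-- B replaces the per-element elif chain over a running dict by independent count passes (objective: simpler).
-- literal port of A: a dict seeded with the three keys at 0, an elif chain per alert, then a fold over items
def count_outage_alerts_py (alerts : List Int) : String :=
  let d0 : PySem.Dict String Int :=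
    ((PySem.Dict.empty.insert "Timeout Errors" 0).insert "API Errors" 0).insert "Unknown Errors" 0
  let d := alerts.foldl (fun d a =>
    if a == 408 then d.modify "Timeout Errors" 0 (· + 1)
    else if 500 ≤ a then d.modify "API Errors" 0 (· + 1)
    else d.modify "Unknown Errors" 0 (· + 1)) d0
  d.items.foldl (fun msg kv =>
    if kv.2 > 0 then msg ++ ("\n" ++ kv.1 ++ ": " ++ PySem.Int.toStr kv.2 ++ "\n") else msg) ""

-- ===== PORT B =====
-- B: independent count passes; unknown = len - timeout - api; join over fixed labeled parts
def count_outage_alerts_py_alt (alerts : List Int) : String :=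
  let timeout : Int := (alerts.countP (fun a => a == 408) : Nat)
  let api : Int := (alerts.countP (fun a => 500 ≤ a) : Nat)
  let unknown : Int := (alerts.length : Int) - timeout - api
  let parts : List (String × Int) :=
    [("Timeout Errors", timeout), ("API Errors", api), ("Unknown Errors", unknown)]
  String.join (parts.filterMap (fun kv =>
    if kv.2 > 0 then some ("\n" ++ kv.1 ++ ": " ++ PySem.Int.toStr kv.2 ++ "\n") else none))

-- ===== PRECONDITION & SPEC =====
def Spec_count_outage_alerts_py (alerts : List Int) (out : String) : Prop := out = count_outage_alerts_py_alt alerts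
instance (alerts : List Int) (out : String) : Decidable (Spec_count_outage_alerts_py alerts out) := by unfold Spec_count_outage_alerts_py; infer_instance

-- ===== CLAIM (what is proved, stated in full; the proofs are below) =====
def Claim_equal_count_outage_alerts_py : Prop := ∀ (alerts : List Int), Dom_count_outage_alerts_py alerts → Spec_count_outage_alerts_py alerts (count_outage_alerts_py alerts)

-- ===== LEMMAS AND PROOFS =====

-- one modify step on the literal three-entry dict
lemma modify_timeout (t a u : Int) :
    ((PySem.Dict.mk [("Timeout Errors", t), ("API Errors", a), ("Unknown Errors", u)]).modify
      "Timeout Errors" 0 (· + 1))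
    = PySem.Dict.mk [("Timeout Errors", t + 1), ("API Errors", a), ("Unknown Errors", u)] := by
  simp [PySem.Dict.modify, PySem.Dict.getD, PySem.Dict.get?, PySem.Dict.insert, PySem.Dict.contains]

lemma modify_api (t a u : Int) :
    ((PySem.Dict.mk [("Timeout Errors", t), ("API Errors", a), ("Unknown Errors", u)]).modify
      "API Errors" 0 (· + 1))
    = PySem.Dict.mk [("Timeout Errors", t), ("API Errors", a + 1), ("Unknown Errors", u)] := by
  simp [PySem.Dict.modify, PySem.Dict.getD, PySem.Dict.get?, PySem.Dict.insert, PySem.Dict.contains]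

lemma modify_unknown (t a u : Int) :
    ((PySem.Dict.mk [("Timeout Errors", t), ("API Errors", a), ("Unknown Errors", u)]).modify
      "Unknown Errors" 0 (· + 1))
    = PySem.Dict.mk [("Timeout Errors", t), ("API Errors", a), ("Unknown Errors", u + 1)] := by
  simp [PySem.Dict.modify, PySem.Dict.getD, PySem.Dict.get?, PySem.Dict.insert, PySem.Dict.contains]

-- the counting loop keeps the dict as a literal three-entry dict with the category counts added
lemma count_loop_items (alerts : List Int) : ∀ (t a u : Int),
    (alerts.foldl (fun d x =>
      if x == 408 then d.modify "Timeout Errors" 0 (· + 1)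
      else if 500 ≤ x then d.modify "API Errors" 0 (· + 1)
      else d.modify "Unknown Errors" 0 (· + 1))
      (PySem.Dict.mk [("Timeout Errors", t), ("API Errors", a), ("Unknown Errors", u)]))
    = PySem.Dict.mk [("Timeout Errors", t + (alerts.countP (fun x => x == 408) : Nat)),
                     ("API Errors", a + (alerts.countP (fun x => decide (500 ≤ x)) : Nat)),
                     ("Unknown Errors", u + (alerts.countP (fun x => !(x == 408) && !(decide (500 ≤ x))) : Nat))] := by
  induction alerts with
  | nil => intro t a u; simp
  | cons x rest ih =>
    intro t a u
    simp only [List.foldl_cons]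
    by_cases h4 : x = 408
    · subst h4
      rw [if_pos (by decide), modify_timeout, ih]
      apply PySem.Dict.ext
      simp
      omega
    · have hb : (x == 408) = false := by simp [h4]
      by_cases h5 : 500 ≤ x
      · rw [if_neg (by simp [h4]), if_pos h5, modify_api, ih]
        apply PySem.Dict.ext
        simp [hb, h5]
        omega
      · rw [if_neg (by simp [h4]), if_neg h5, modify_unknown, ih]
        apply PySem.Dict.ext
        simp [hb, h5]
        omega

-- the three category counts partition the list
lemma count_partition (alerts : List Int) :
    alerts.countP (fun x => x == 408) + alerts.countP (fun x => decide (500 ≤ x))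
      + alerts.countP (fun x => !(x == 408) && !(decide (500 ≤ x))) = alerts.length := by
  induction alerts with
  | nil => simp
  | cons x rest ih =>
    simp only [List.countP_cons, List.length_cons]
    by_cases h4 : x = 408
    · subst h4; simp; omega
    · by_cases h5 : 500 ≤ x <;> simp [h4, h5] <;> omega

-- ===== VERDICT (by name: the statement is the Claim_ definition above) =====
theorem count_outage_alerts_py_spec : Claim_equal_count_outage_alerts_py := by
  intro alerts _
  unfold Spec_count_outage_alerts_py
  dsimp only [count_outage_alerts_py, count_outage_alerts_py_alt]
  have hd0 : ((PySem.Dict.empty.insert "Timeout Errors" (0:Int)).insert "API Errors" 0).insert "Unknown Errors" 0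
      = PySem.Dict.mk [("Timeout Errors", 0), ("API Errors", 0), ("Unknown Errors", 0)] := by decide
  rw [hd0, count_loop_items]
  have hpart := count_partition alerts
  have hu : (0 : Int) + (alerts.countP (fun x => !(x == 408) && !(decide (500 ≤ x))) : Nat)
      = (alerts.length : Int) - (alerts.countP (fun x => x == 408) : Nat)
        - (alerts.countP (fun x => decide (500 ≤ x)) : Nat) := by omega
  simp only [hu, zero_add] at *
  simp [String.join, List.filterMap]
  split_ifs <;> simp [String.append_assoc]
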